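-- pv_equiv track=rewrite | github.com/pypi-data/pypi-mirror-403 | packages/session-buddy/session_buddy-0.12.0.tar.gz/session_buddy-0.12.0/session_buddy/tools/search_tools.py | _find_best_error_excerpt
-- ===== SOURCE A (Python) =====
-- def _find_best_error_excerpt(content: str) -> str:
--     """Find the most relevant excerpt from content based on error keywords."""
--     error_keywords = ["error", "exception", "traceback", "failed", "fix"]
--     best_excerpt = ""
--     best_score = 0
--
--     for keyword in error_keywords:
--         if keyword in content.lower():
--             start = max(0, content.lower().find(keyword) - 75)
--             end = min(len(content), start + 200)
--             excerpt = content[start:end]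
--             score = content.lower().count(keyword)
--             if score > best_score:
--                 best_score = score
--                 best_excerpt = excerpt
--
--     return best_excerpt or content[:150]
-- ===== SOURCE B (Python) =====
-- def _find_best_error_excerpt(content: str) -> str:
--     """Find the most relevant excerpt from content based on error keywords."""
--     keywords = ["error", "exception", "traceback", "failed", "fix"]
--     low = content.lower()
--     # One pass over the text: at each position update, for every keyword, its
--     # occurrence count and (once) the index of its first occurrence.  The five
--     # keywords have no self-overlap, so per-position counting equals str.count.
--     stats = [(k, 0, -1) for k in keywords]
--     for i in range(len(low)):
--         stats = [
--             (k, c + 1, i if f < 0 else f) if low.startswith(k, i) else (k, c, f)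
--             for (k, c, f) in stats
--         ]
--     best = ("", 0, -1)
--     for entry in stats:
--         if entry[1] > best[1]:
--             best = entry
--     if best[1] == 0:
--         return content[:150]
--     start = max(0, best[2] - 75)
--     return content[start:min(len(content), start + 200)]
-- ===== Notes on version B (the rewrite author's own statement) =====
-- stated objective: alternative
-- what changed: B replaces A's per-keyword library scans (lower/count/find per keyword) by a single left-to-right pass over the lowered text that maintains counts and first-occurrence indices for all five keywords at once, then a selection pass picks the winner and slices once; correctness rests on the keywords being self-overlap-free so per-position counting equals str.count.
import Mathlib
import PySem

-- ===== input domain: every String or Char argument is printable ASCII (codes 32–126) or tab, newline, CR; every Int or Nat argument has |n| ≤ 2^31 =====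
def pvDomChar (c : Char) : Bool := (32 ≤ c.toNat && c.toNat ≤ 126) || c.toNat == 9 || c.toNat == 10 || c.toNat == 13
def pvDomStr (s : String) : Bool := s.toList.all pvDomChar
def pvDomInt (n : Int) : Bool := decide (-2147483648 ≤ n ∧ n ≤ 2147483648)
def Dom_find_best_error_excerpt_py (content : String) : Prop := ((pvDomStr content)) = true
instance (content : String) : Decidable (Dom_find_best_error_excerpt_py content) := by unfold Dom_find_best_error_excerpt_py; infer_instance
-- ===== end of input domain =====

-- B (alternative): one left-to-right pass over the lowered text maintaining, for all five
-- keywords at once, an occurrence count and the first-occurrence index; then a selection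
-- pass; no per-keyword count/find library scans (the keywords are self-overlap-free, so
-- per-position counting agrees with Python's non-overlapping str.count).

-- ===== PORT A =====
def find_best_error_excerpt_py (content : String) : String :=
  let error_keywords : List String := ["error", "exception", "traceback", "failed", "fix"]
  let st :=
    error_keywords.foldl
      (fun (st : String × Nat) keyword =>
        if PySem.Str.isIn keyword (PySem.Str.lower content) then
          let start : Int := max 0 (PySem.Str.find (PySem.Str.lower content) keyword - 75)
          let stop : Int := min (PySem.Str.len content) (start + 200)
          let excerpt := PySem.Str.slice content (some start) (some stop)
          let score := PySem.Str.count (PySem.Str.lower content) keyword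
          if score > st.2 then (excerpt, score) else st
        else st)
      ("", 0)
  if st.1 = "" then PySem.Str.slice content none (some 150) else st.1

-- ===== PORT B =====
-- `low.startswith(k, i)` is ported by hand as a prefix test on the i-th suffix of `low`
-- (exact for 0 ≤ i, which holds since i comes from range(len(low))).
def find_best_error_excerpt_py_alt (content : String) : String :=
  let keywords : List String := ["error", "exception", "traceback", "failed", "fix"]
  let low := (PySem.Str.lower content).toList
  let stats0 := keywords.map (fun k => (k, (0 : Nat), (-1 : Int)))
  let stats :=
    (List.range low.length).foldl
      (fun (st : List (String × Nat × Int)) i =>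
        st.map (fun e =>
          if PySem.Chars.startswith (low.drop i) e.1.toList then
            (e.1, e.2.1 + 1, if e.2.2 < 0 then (i : Int) else e.2.2)
          else e))
      stats0
  let best :=
    stats.foldl (fun (b : String × Nat × Int) e => if e.2.1 > b.2.1 then e else b) ("", 0, -1)
  if best.2.1 = 0 then PySem.Str.slice content none (some 150)
  else
    let start : Int := max 0 (best.2.2 - 75)
    PySem.Str.slice content (some start) (some (min (PySem.Str.len content) (start + 200)))

-- ===== PRECONDITION & SPEC =====
def Spec_find_best_error_excerpt_py (content : String) (out : String) : Prop := out = find_best_error_excerpt_py_alt content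
instance (content : String) (out : String) : Decidable (Spec_find_best_error_excerpt_py content out) := by unfold Spec_find_best_error_excerpt_py; infer_instance

-- ===== CLAIM (what is proved, stated in full; the proofs are below) =====
def Claim_equal_find_best_error_excerpt_py : Prop := ∀ (content : String), Dom_find_best_error_excerpt_py content → Spec_find_best_error_excerpt_py content (find_best_error_excerpt_py content)

-- ===== LEMMAS AND PROOFS =====

-- the count of keyword k in content.lower()
def pvC (content k : String) : Nat := PySem.Str.count (PySem.Str.lower content) k

-- the excerpt A/B compute for keyword k
def pvE (content k : String) : String :=
  PySem.Str.slice content (some (max 0 (PySem.Str.find (PySem.Str.lower content) k - 75)))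
    (some (min (PySem.Str.len content) (max 0 (PySem.Str.find (PySem.Str.lower content) k - 75) + 200)))

-- A's loop state once k is the best keyword so far
def pvRep (content k : String) : String × Nat :=
  if pvC content k = 0 then ("", 0) else (pvE content k, pvC content k)

-- A's loop body (definitionally equal to the lambda in port A)
def pvStepA (content : String) (st : String × Nat) (keyword : String) : String × Nat :=
  if PySem.Str.isIn keyword (PySem.Str.lower content) then
    if pvC content keyword > st.2 then (pvE content keyword, pvC content keyword) else st
  else st

-- running first maximum by count
def pvBest (content : String) (m : String) (kws : List String) : String :=
  kws.foldl (fun b k => if pvC content b < pvC content k then k else b) m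

lemma count_go_of_not_infix (sub : List Char) :
    ∀ (fuel : Nat) (s : List Char) (acc : Nat), ¬ sub <:+: s →
      PySem.Chars.count.go sub fuel s acc = acc := by
  intro fuel
  induction fuel with
  | zero => intro s acc _; rw [PySem.Chars.count.go.eq_def]
  | succ n ih =>
    intro s acc h
    cases s with
    | nil => rw [PySem.Chars.count.go.eq_def]
    | cons hd t =>
      rw [PySem.Chars.count.go.eq_def]
      have h1 : sub.isPrefixOf (hd :: t) = false := by
        by_contra hb
        exact h (List.IsPrefix.isInfix (List.isPrefixOf_iff_prefix.mp (by simpa using hb)))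
      simp only [h1, Bool.false_eq_true, if_false]
      exact ih t acc (fun hi => h (List.infix_cons_iff.mpr (Or.inr hi)))

lemma count_eq_zero_of_not_infix (s sub : List Char) (h : ¬ sub <:+: s) :
    PySem.Chars.count s sub = 0 := by
  have hne : sub ≠ [] := by rintro rfl; exact h List.nil_infix
  unfold PySem.Chars.count
  rw [if_neg (by simpa [List.isEmpty_iff] using hne)]
  exact count_go_of_not_infix sub s.length s 0 h

-- a positive count means the keyword occurs
lemma infix_of_pvC_ne_zero (content k : String) (hc : pvC content k ≠ 0) :
    k.toList <:+: (PySem.Str.lower content).toList := by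
  by_contra h
  exact hc (by simpa [pvC, PySem.Str.count_eq] using count_eq_zero_of_not_infix _ _ h)

lemma isIn_of_pvC_ne_zero (content k : String) (hc : pvC content k ≠ 0) :
    PySem.Str.isIn k (PySem.Str.lower content) = true := by
  rw [PySem.Str.isIn_eq]
  exact (PySem.Chars.isIn_iff_infix _ _).mpr (infix_of_pvC_ne_zero content k hc)

lemma pvC_eq_zero_of_not_isIn (content k : String)
    (h : ¬ PySem.Str.isIn k (PySem.Str.lower content) = true) : pvC content k = 0 := by
  by_contra hc
  exact h (isIn_of_pvC_ne_zero content k hc)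

lemma pvRep_snd (content m : String) : (pvRep content m).2 = pvC content m := by
  unfold pvRep; split_ifs with h <;> simp [h]

lemma stepA_init (content k : String) :
    pvStepA content ("", 0) k = pvRep content k := by
  unfold pvStepA pvRep
  by_cases h : PySem.Str.isIn k (PySem.Str.lower content) = true
  · rw [if_pos h]
    by_cases hc : pvC content k = 0
    · rw [if_neg (by omega), if_pos hc]
    · rw [if_pos (by omega), if_neg hc]
  · rw [if_neg h, if_pos (pvC_eq_zero_of_not_isIn content k h)]

lemma stepA_rep (content m k : String) :
    pvStepA content (pvRep content m) k
      = pvRep content (if pvC content m < pvC content k then k else m) := by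
  by_cases hlt : pvC content m < pvC content k
  · rw [if_pos hlt]
    have hck : pvC content k ≠ 0 := by omega
    unfold pvStepA
    rw [if_pos (isIn_of_pvC_ne_zero content k hck), pvRep_snd]
    rw [if_pos (by omega)]
    unfold pvRep
    rw [if_neg hck]
  · rw [if_neg hlt]
    unfold pvStepA
    by_cases h : PySem.Str.isIn k (PySem.Str.lower content) = true
    · rw [if_pos h, pvRep_snd, if_neg (by omega)]
    · rw [if_neg h]

lemma foldA_eq (content : String) :
    ∀ (kws : List String) (m : String),
      kws.foldl (pvStepA content) (pvRep content m) = pvRep content (pvBest content m kws) := by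
  intro kws
  induction kws with
  | nil => intro m; rfl
  | cons k t ih =>
    intro m
    show t.foldl (pvStepA content) (pvStepA content (pvRep content m) k)
        = pvRep content (pvBest content m (k :: t))
    rw [stepA_rep]
    exact ih _

lemma foldl_pick_mem {α : Type} (f : α → α → α) (h : ∀ a b, f a b = a ∨ f a b = b) :
    ∀ (l : List α) (m : α), l.foldl f m ∈ m :: l := by
  intro l
  induction l with
  | nil => intro m; exact List.mem_singleton.mpr rfl
  | cons x t ih =>
    intro m
    rw [List.foldl_cons]
    rcases List.mem_cons.mp (ih (f m x)) with h2 | h2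
    · rcases h m x with h1 | h1 <;> rw [h2, h1] <;> simp
    · simp [h2]

lemma pvBest_mem (content : String) (m : String) (kws : List String) :
    pvBest content m kws ∈ m :: kws :=
  foldl_pick_mem _
    (fun a b => by
      by_cases h : pvC content a < pvC content b
      · exact Or.inr (if_pos h)
      · exact Or.inl (if_neg h))
    kws m

lemma string_ne_empty_of_toList_ne (s : String) (h : s.toList ≠ []) : s ≠ "" := by
  intro he; exact h (by rw [he]; rfl)

lemma slice_ne_empty (s : String) (a b : Int) (h0 : 0 ≤ a) (hab : a < b)
    (hb : b ≤ (s.toList.length : Int)) : PySem.Str.slice s (some a) (some b) ≠ "" := by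
  apply string_ne_empty_of_toList_ne
  rw [PySem.Str.toList_slice, PySem.Chars.slice_eq_listSlice,
    PySem.List.slice_of_nonneg _ h0 (by omega) (by omega) hb]
  intro hnil
  have h2 := congrArg List.length hnil
  rw [List.length_take, List.length_drop] at h2
  simp only [List.length_nil] at h2
  omega

lemma pvE_ne_empty (content k : String) (hk : k.toList ≠ []) (hc : pvC content k ≠ 0) :
    pvE content k ≠ "" := by
  have hinf := infix_of_pvC_ne_zero content k hc
  have hf0 : 0 ≤ PySem.Str.find (PySem.Str.lower content) k := by
    rw [PySem.Str.find_eq]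
    exact (PySem.Chars.find_nonneg_iff _ _).mpr hinf
  have hlen : (PySem.Str.lower content).toList.length = content.toList.length := by
    simp [PySem.Str.toList_lower, PySem.Chars.lower]
  have hfn : PySem.Str.find (PySem.Str.lower content) k < (content.toList.length : Int) := by
    rw [PySem.Str.find_eq] at hf0 ⊢
    have hspec := (@PySem.Chars.find_spec (PySem.Str.lower content).toList k.toList hf0).1
    by_contra hge
    have hdrop : ((PySem.Str.lower content).toList.drop
        (PySem.Chars.find (PySem.Str.lower content).toList k.toList).toNat) = [] :=
      List.drop_eq_nil_of_le (by omega)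
    rw [hdrop] at hspec
    exact hk (List.prefix_nil.mp hspec)
  have hlc : PySem.Str.len content = (content.toList.length : Int) := PySem.Str.len_eq content
  unfold pvE
  apply slice_ne_empty
  · exact le_max_left _ _
  · rw [hlc]; omega
  · rw [hlc]; omega

-- ===========================  B-side theory  ===========================

-- per-position ("overlapping") count of k in s: one test at every suffix
def pvCnt (k : List Char) : List Char → Nat
  | [] => 0
  | c :: t => (if PySem.Chars.startswith (c :: t) k then 1 else 0) + pvCnt k t

-- index of the first position where k starts, if any
def pvFstIdx (k : List Char) : List Char → Option Nat
  | [] => none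
  | c :: t => if PySem.Chars.startswith (c :: t) k then some 0 else (pvFstIdx k t).map (· + 1)

-- what B's scan computes for one keyword entry
def pvRun (k : List Char) (cf : Nat × Int) (i : Nat) : List Char → Nat × Int
  | [] => cf
  | c :: t =>
    pvRun k
      (if PySem.Chars.startswith (c :: t) k then
        (cf.1 + 1, if cf.2 < 0 then (i : Int) else cf.2)
      else cf) (i + 1) t

-- B's inner comprehension (definitionally equal to the lambda in port B)
def pvStepB (low : List Char) (st : List (String × Nat × Int)) (i : Nat) :
    List (String × Nat × Int) :=
  st.map (fun e =>
    if PySem.Chars.startswith (low.drop i) e.1.toList then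
      (e.1, e.2.1 + 1, if e.2.2 < 0 then (i : Int) else e.2.2)
    else e)

-- "k has no nontrivial border": no proper shift of k over itself matches
def pvNoBorder (k : List Char) : Prop :=
  ∀ j < k.length, 1 ≤ j → k.drop j ≠ k.take (k.length - j)

-- the ultimately stored first-occurrence field
def pvFInt (content k : String) : Int :=
  match pvFstIdx k.toList (PySem.Str.lower content).toList with
  | none => -1
  | some j => (j : Int)

-- B's selection state once k is the best keyword so far
def pvRepB (content k : String) : String × Nat × Int :=
  if pvC content k = 0 then ("", 0, -1) else (k, pvC content k, pvFInt content k)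

lemma pvRun_eq (k : List Char) :
    ∀ (s : List Char) (c : Nat) (f : Int) (i : Nat),
      pvRun k (c, f) i s =
        (c + pvCnt k s,
         if f < 0 then
           (match pvFstIdx k s with | none => f | some j => ((i + j : Nat) : Int))
         else f) := by
  intro s
  induction s with
  | nil => intro c f i; simp [pvRun, pvCnt, pvFstIdx]
  | cons ch t ih =>
    intro c f i
    by_cases h : PySem.Chars.startswith (ch :: t) k = true
    · simp only [pvRun, pvCnt, pvFstIdx, h, if_pos]
      rw [ih]
      by_cases hf : f < 0
      · rw [if_pos hf]
        have hnn : ¬ ((i : Int) < 0) := by omega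
        simp only [hnn, if_false, if_pos hf, Prod.mk.injEq]
        exact ⟨by omega, by simp⟩
      · rw [if_neg hf, if_neg hf, if_neg hf]
        simp only [Prod.mk.injEq]
        exact ⟨by omega, trivial⟩
    · simp only [pvRun, pvCnt, pvFstIdx, h, Bool.false_eq_true, if_false]
      rw [ih]
      by_cases hf : f < 0
      · rw [if_pos hf, if_pos hf]
        simp only [Prod.mk.injEq]
        refine ⟨by omega, ?_⟩
        cases hfst : pvFstIdx k t with
        | none => simp
        | some j =>
          simp only [Option.map_some]
          congr 1
          omega
      · rw [if_neg hf, if_neg hf]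
        simp only [Prod.mk.injEq]
        exact ⟨by omega, trivial⟩

-- the scan fold computes pvRun entrywise
lemma foldB_eq (low : List Char) :
    ∀ (tl : List Char) (i : Nat) (stats : List (String × Nat × Int)),
      low.drop i = tl →
      (List.range' i tl.length).foldl (pvStepB low) stats
        = stats.map (fun e => (e.1, pvRun e.1.toList e.2 i tl)) := by
  intro tl
  induction tl with
  | nil =>
    intro i stats _
    simp [pvRun]
  | cons c t ih =>
    intro i stats hdrop
    have hdrop' : low.drop (i + 1) = t := by
      rw [← List.drop_drop, hdrop, List.drop_one, List.tail_cons]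
    rw [List.length_cons, List.range'_succ, List.foldl_cons, ih (i + 1) _ hdrop',
      pvStepB, List.map_map]
    apply List.map_congr_left
    intro e _
    simp only [Function.comp]
    rw [hdrop]
    by_cases h : PySem.Chars.startswith (c :: t) e.1.toList = true
    · simp only [h, if_pos, pvRun]
    · simp only [h, Bool.false_eq_true, if_false, pvRun]

lemma startswith_nil (k : List Char) (hk : k ≠ []) :
    PySem.Chars.startswith [] k = false := by
  rw [← Bool.not_eq_true, PySem.Chars.startswith_iff]
  intro h
  exact hk (List.prefix_nil.mp h)

lemma pvCnt_step1 (k : List Char) (hk : k ≠ []) (s : List Char) :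
    pvCnt k s = (if PySem.Chars.startswith s k then 1 else 0) + pvCnt k (s.drop 1) := by
  cases s with
  | nil => simp [pvCnt, startswith_nil k hk]
  | cons c t => rfl

lemma pvCnt_drop (k : List Char) (hk : k ≠ []) :
    ∀ (m : Nat), 1 ≤ m →
      ∀ (s : List Char), (∀ j, 1 ≤ j → j < m → PySem.Chars.startswith (s.drop j) k = false) →
      pvCnt k s = (if PySem.Chars.startswith s k then 1 else 0) + pvCnt k (s.drop m) := by
  intro m
  induction m with
  | zero => omega
  | succ n ih =>
    intro _ s hno
    by_cases hn : 1 ≤ n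
    · rw [ih hn s (fun j h1 h2 => hno j h1 (by omega))]
      have : pvCnt k (s.drop n) = pvCnt k (s.drop (n + 1)) := by
        rw [pvCnt_step1 k hk (s.drop n), hno n hn (by omega)]
        simp [List.drop_drop]
      rw [this]
    · have hn0 : n = 0 := by omega
      subst hn0
      exact pvCnt_step1 k hk s

-- no-border keywords cannot match again within their own length
lemma no_rematch (k : List Char) (hnb : pvNoBorder k) (s : List Char)
    (hp : k <+: s) : ∀ j, 1 ≤ j → j < k.length → ¬ k <+: s.drop j := by
  intro j h1 h2 hpj
  apply hnb j h2 h1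
  have e1 : k = List.take k.length s := List.prefix_iff_eq_take.mp hp
  have e2 : k = List.take k.length (s.drop j) := List.prefix_iff_eq_take.mp hpj
  have hkd : k.drop j = (s.drop j).take (k.length - j) := by
    have h3 := congrArg (List.drop j) e1
    rw [List.drop_take] at h3
    exact h3
  have hkt : k.take (k.length - j) = (s.drop j).take (k.length - j) := by
    have h4 := congrArg (List.take (k.length - j)) e2
    rw [List.take_take, min_eq_left (by omega)] at h4
    exact h4
  rw [hkd, hkt]

lemma go_eq_pvCnt (k : List Char) (hk : k ≠ []) (hnb : pvNoBorder k) :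
    ∀ (fuel : Nat) (s : List Char) (acc : Nat), s.length ≤ fuel →
      PySem.Chars.count.go k fuel s acc = acc + pvCnt k s := by
  intro fuel
  induction fuel with
  | zero =>
    intro s acc hle
    have : s = [] := List.eq_nil_of_length_eq_zero (by omega)
    subst this
    rw [PySem.Chars.count.go.eq_def]
    simp [pvCnt]
  | succ n ih =>
    intro s acc hle
    cases s with
    | nil => rw [PySem.Chars.count.go.eq_def]; simp [pvCnt]
    | cons c t =>
      rw [PySem.Chars.count.go.eq_def]
      by_cases h : k.isPrefixOf (c :: t) = true
      · have hpre : k <+: (c :: t) := List.isPrefixOf_iff_prefix.mp h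
        simp only [h, if_pos]
        have hklen : 1 ≤ k.length := by
          cases k with
          | nil => exact absurd rfl hk
          | cons _ _ => simp
        rw [ih _ (acc + 1) (by simp at hle ⊢; omega)]
        have hc : pvCnt k (c :: t)
            = (if PySem.Chars.startswith (c :: t) k then 1 else 0)
              + pvCnt k ((c :: t).drop k.length) := by
          apply pvCnt_drop k hk k.length hklen
          intro j h1 h2
          rw [← Bool.not_eq_true, PySem.Chars.startswith_iff]
          exact no_rematch k hnb (c :: t) hpre j h1 h2
        rw [hc, if_pos ((PySem.Chars.startswith_iff _ _).mpr hpre)]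
        omega
      · have hnpre : ¬ k <+: (c :: t) := fun hp => h (List.isPrefixOf_iff_prefix.mpr hp)
        simp only [h, Bool.false_eq_true, if_false]
        rw [ih t acc (by simp at hle ⊢; omega)]
        rw [pvCnt_step1 k hk (c :: t),
          if_neg (by rw [PySem.Chars.startswith_iff]; exact hnpre)]
        simp

lemma count_eq_pvCnt (k : List Char) (hk : k ≠ []) (hnb : pvNoBorder k) (s : List Char) :
    PySem.Chars.count s k = pvCnt k s := by
  unfold PySem.Chars.count
  rw [if_neg (by simpa [List.isEmpty_iff] using hk)]
  simpa using go_eq_pvCnt k hk hnb s.length s 0 le_rfl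

lemma pvCnt_eq_zero_of_fstIdx_none (k : List Char) :
    ∀ (s : List Char), pvFstIdx k s = none → pvCnt k s = 0 := by
  intro s
  induction s with
  | nil => intro _; rfl
  | cons c t ih =>
    intro h
    by_cases hs : PySem.Chars.startswith (c :: t) k = true
    · simp [pvFstIdx, hs] at h
    · simp only [pvFstIdx, hs, Bool.false_eq_true, if_false, Option.map_eq_none_iff] at h
      simp [pvCnt, hs, ih h]

lemma pvFstIdx_spec (k : List Char) :
    ∀ (s : List Char) (j : Nat), pvFstIdx k s = some j →
      PySem.Chars.startswith (s.drop j) k = true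
        ∧ ∀ i < j, PySem.Chars.startswith (s.drop i) k = false := by
  intro s
  induction s with
  | nil => intro j h; simp [pvFstIdx] at h
  | cons c t ih =>
    intro j h
    by_cases hs : PySem.Chars.startswith (c :: t) k = true
    · simp only [pvFstIdx, hs, if_pos, Option.some.injEq] at h
      subst h
      exact ⟨hs, fun i hi => absurd hi (by omega)⟩
    · simp only [pvFstIdx, hs, Bool.false_eq_true, if_false, Option.map_eq_some_iff] at h
      obtain ⟨j', hj', rfl⟩ := h
      obtain ⟨h1, h2⟩ := ih j' hj'
      refine ⟨by simpa using h1, ?_⟩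
      intro i hi
      cases i with
      | zero => simpa using (Bool.not_eq_true _).mp hs
      | succ i' => simpa using h2 i' (by omega)

lemma find_eq_of_fstIdx_some (k s : List Char) (j : Nat)
    (h : pvFstIdx k s = some j) : PySem.Chars.find s k = (j : Int) := by
  obtain ⟨h1, h2⟩ := pvFstIdx_spec k s j h
  have hpre : k <+: s.drop j := (PySem.Chars.startswith_iff _ _).mp h1
  have hinf : k <:+: s := hpre.isInfix.trans (List.drop_suffix j s).isInfix
  have hge : 0 ≤ PySem.Chars.find s k := (PySem.Chars.find_nonneg_iff s k).mpr hinf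
  obtain ⟨hp, hmin⟩ := PySem.Chars.find_spec hge
  have hj1 : ¬ j < (PySem.Chars.find s k).toNat := fun hlt => hmin j hlt hpre
  have hj2 : ¬ (PySem.Chars.find s k).toNat < j := by
    intro hlt
    have := h2 (PySem.Chars.find s k).toNat hlt
    rw [← Bool.not_eq_true, PySem.Chars.startswith_iff] at this
    exact this hp
  omega

-- B's selection step (definitionally equal to the lambda in port B)
def pvStepSel (b e : String × Nat × Int) : String × Nat × Int :=
  if e.2.1 > b.2.1 then e else b

lemma pvRepB_snd (content m : String) : (pvRepB content m).2.1 = pvC content m := by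
  unfold pvRepB; split_ifs with h <;> simp [h]

lemma stepSel_init (content k : String) :
    pvStepSel ("", 0, -1) (k, pvC content k, pvFInt content k) = pvRepB content k := by
  unfold pvStepSel pvRepB
  by_cases hc : pvC content k = 0
  · rw [if_neg (by simp; omega), if_pos hc]
  · rw [if_pos (by simp; omega), if_neg hc]

lemma stepSel_rep (content m k : String) :
    pvStepSel (pvRepB content m) (k, pvC content k, pvFInt content k)
      = pvRepB content (if pvC content m < pvC content k then k else m) := by
  by_cases hlt : pvC content m < pvC content k
  · rw [if_pos hlt]
    unfold pvStepSel
    rw [pvRepB_snd]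
    rw [if_pos (by simp; omega)]
    unfold pvRepB
    rw [if_neg (by omega)]
  · rw [if_neg hlt]
    unfold pvStepSel
    rw [pvRepB_snd]
    rw [if_neg (by simp; omega)]

lemma foldSel_eq (content : String) :
    ∀ (kws : List String) (m : String),
      kws.foldl (fun b k => pvStepSel b (k, pvC content k, pvFInt content k))
          (pvRepB content m)
        = pvRepB content (pvBest content m kws) := by
  intro kws
  induction kws with
  | nil => intro m; rfl
  | cons k t ih =>
    intro m
    rw [List.foldl_cons, stepSel_rep]
    exact ih _

-- count bridge for the concrete keywords in the running text
lemma pvCnt_eq_pvC (content k : String) (hk : k.toList ≠ []) (hnb : pvNoBorder k.toList) :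
    pvCnt k.toList (PySem.Str.lower content).toList = pvC content k := by
  rw [pvC, PySem.Str.count_eq, count_eq_pvCnt k.toList hk hnb]

lemma pvGood_keywords (k : String)
    (hk : k ∈ ["error", "exception", "traceback", "failed", "fix"]) :
    k.toList ≠ [] ∧ pvNoBorder k.toList := by
  have hdec : ∀ (w : String), w.toList ≠ [] →
      (∀ j < w.toList.length, 1 ≤ j → w.toList.drop j ≠ w.toList.take (w.toList.length - j)) →
      w.toList ≠ [] ∧ pvNoBorder w.toList := fun w h1 h2 => ⟨h1, h2⟩
  fin_cases hk <;> exact hdec _ (by decide) (by decide)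

-- ===== VERDICT (by name: the statement is the Claim_ definition above) =====
set_option maxHeartbeats 2000000 in
theorem find_best_error_excerpt_py_spec : Claim_equal_find_best_error_excerpt_py := by
  intro content _
  unfold Spec_find_best_error_excerpt_py
  set kws : List String := ["error", "exception", "traceback", "failed", "fix"] with hkws
  set W : String := pvBest content "error" ["exception", "traceback", "failed", "fix"] with hW
  -- ----- A's value -----
  have h1 : find_best_error_excerpt_py content =
      (if (pvRep content W).1 = "" then PySem.Str.slice content none (some 150)
       else (pvRep content W).1) := by
    show (if (List.foldl (pvStepA content) ("", 0) kws).1 = ""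
          then PySem.Str.slice content none (some 150)
          else (List.foldl (pvStepA content) ("", 0) kws).1) = _
    rw [hkws, List.foldl_cons, stepA_init, foldA_eq]
  -- ----- B's value -----
  set low : List Char := (PySem.Str.lower content).toList with hlow
  have hscan : (List.range low.length).foldl (pvStepB low)
        (kws.map (fun k => (k, (0 : Nat), (-1 : Int))))
      = kws.map (fun k => (k, pvC content k, pvFInt content k)) := by
    rw [List.range_eq_range', foldB_eq low low 0 _ rfl, List.map_map]
    apply List.map_congr_left
    intro k hkmem
    obtain ⟨hk, hnb⟩ := pvGood_keywords k (by rw [← hkws]; exact hkmem)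
    simp only [Function.comp]
    rw [pvRun_eq]
    simp only [show ((-1 : Int) < 0) = True by simp, if_true]
    rw [pvCnt_eq_pvC content k hk hnb]
    unfold pvFInt
    rw [← hlow]
    cases hf : pvFstIdx k.toList low with
    | none => simp
    | some j => simp
  have hB : find_best_error_excerpt_py_alt content =
      (fun b : String × Nat × Int =>
        if b.2.1 = 0 then PySem.Str.slice content none (some 150)
        else PySem.Str.slice content (some (max 0 (b.2.2 - 75)))
          (some (min (PySem.Str.len content) (max 0 (b.2.2 - 75) + 200))))
      (((List.range low.length).foldl (pvStepB low)
          (kws.map (fun k => (k, (0 : Nat), (-1 : Int))))).foldl pvStepSel ("", 0, -1)) := rfl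
  have h2 : find_best_error_excerpt_py_alt content =
      (if (pvRepB content W).2.1 = 0 then PySem.Str.slice content none (some 150)
       else PySem.Str.slice content (some (max 0 ((pvRepB content W).2.2 - 75)))
         (some (min (PySem.Str.len content) (max 0 ((pvRepB content W).2.2 - 75) + 200)))) := by
    rw [hB, hscan, hkws]
    rw [show (List.map (fun k => (k, pvC content k, pvFInt content k))
          ["error", "exception", "traceback", "failed", "fix"])
        = ((("error" : String), pvC content "error", pvFInt content "error")
            :: List.map (fun k => (k, pvC content k, pvFInt content k))
                ["exception", "traceback", "failed", "fix"]) from rfl]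
    rw [List.foldl_cons, List.foldl_map, stepSel_init, foldSel_eq]
  rw [h1, h2]
  -- ----- compare -----
  by_cases hc : pvC content W = 0
  · have e1 : pvRep content W = ("", 0) := by unfold pvRep; rw [if_pos hc]
    have e2 : pvRepB content W = ("", 0, -1) := by unfold pvRepB; rw [if_pos hc]
    rw [e1, e2]
    rfl
  · have hWmem : W ∈ kws := by
      have hm := pvBest_mem content "error" ["exception", "traceback", "failed", "fix"]
      rw [← hW] at hm
      simpa [hkws] using hm
    obtain ⟨hWne, hWnb⟩ := pvGood_keywords W (by rw [← hkws]; exact hWmem)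
    have hfs : ∃ j, pvFstIdx W.toList low = some j := by
      cases hf : pvFstIdx W.toList low with
      | none =>
        exfalso
        apply hc
        rw [← pvCnt_eq_pvC content W hWne hWnb]
        exact pvCnt_eq_zero_of_fstIdx_none W.toList low hf
      | some j => exact ⟨j, rfl⟩
    obtain ⟨j, hj⟩ := hfs
    have hfind : PySem.Str.find (PySem.Str.lower content) W = (j : Int) := by
      rw [PySem.Str.find_eq, ← hlow]
      exact find_eq_of_fstIdx_some W.toList low j hj
    have er1 : (pvRep content W).1 = pvE content W := by
      unfold pvRep; rw [if_neg hc]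
    have er2 : (pvRepB content W).2.1 = pvC content W := pvRepB_snd content W
    have er3 : (pvRepB content W).2.2 = pvFInt content W := by
      unfold pvRepB; rw [if_neg hc]
    rw [er1, er2, er3, if_neg (pvE_ne_empty content W hWne hc), if_neg hc]
    unfold pvE pvFInt
    rw [← hlow, hj, hfind]
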